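-- pv_equiv track=rewrite | github.com/fylmr/CryptoCross | lib/utilities.py | insert_word_h_pos
-- ===== SOURCE A (Python) =====
-- def insert_word_h_pos(grid, length):
--     """
--     Вставить слово по горизонтали
--
--     Arguments:
--     grid : list
--     length : int
--
--     Returns:
--     row, col : int
--         Где вставлять слово
--     """
--
--     for row in range(len(grid)):
--         count = 0
--         for col in range(len(grid)):
--             if grid[row][col] == "_":
--                 count += 1
--             if count == length:
--                 return row, col - length + 1
--             else:
--                 if grid[row][col] == "_":
--                     pass
--                 else:
--                     count = 0
-- ===== SOURCE B (Python) =====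
-- def insert_word_h_pos(grid, length):
--     n = len(grid)
--     needle = "_" * length
--     for row in range(n):
--         mask = "".join("_" if grid[row][c] == "_" else "#" for c in range(n))
--         i = mask.find(needle)
--         if i != -1:
--             return row, i
-- ===== Notes on version B (the rewrite author's own statement) =====
-- stated objective: idiomatic
-- what changed: A's running-count state machine with manual reset logic is replaced by the idiomatic per-row scan: build the row's mask over the first len(grid) cells and return the index of the first occurrence of '_'*length via str.find; Pre_ excludes rows shorter than len(grid) (A raises IndexError) and nonpositive length, an unspecified corner where A's and B's values are equally defensible.
-- outside the precondition, e.g. on insert_word_h_pos([['a']], 0): A returns (0, 1), B returns (0, 0); on insert_word_h_pos([['_']], -1): A returns None, B returns (0, 0)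
import Mathlib
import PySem

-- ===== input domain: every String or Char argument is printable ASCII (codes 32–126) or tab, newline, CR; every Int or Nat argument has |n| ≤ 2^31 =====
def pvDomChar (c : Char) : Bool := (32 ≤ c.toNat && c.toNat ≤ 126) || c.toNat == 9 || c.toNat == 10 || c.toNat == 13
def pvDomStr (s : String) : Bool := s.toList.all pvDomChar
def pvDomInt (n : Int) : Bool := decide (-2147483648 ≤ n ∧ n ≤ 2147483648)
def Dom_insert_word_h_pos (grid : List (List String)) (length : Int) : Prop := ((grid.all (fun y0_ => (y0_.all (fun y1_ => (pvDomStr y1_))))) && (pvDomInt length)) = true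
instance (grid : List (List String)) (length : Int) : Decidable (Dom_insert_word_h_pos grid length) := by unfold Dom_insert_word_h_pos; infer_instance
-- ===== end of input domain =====

-- B replaces A's running-count state machine by the idiomatic per-row substring search
-- mask.find('_'*length); no speed claim.

-- ===== PORT A =====
-- inner loop of A: for col in range(len(grid)) with the running count; the cell access
-- grid[row][col] is in range on every input admitted by Pre_ (the getD defaults are never hit there)
def pvAInner (row : List String) (length : Int) (count : Int) : List Int → Option Int
  | [] => none
  | col :: rest =>
    let cell := (PySem.List.pyGet? row col).getD ""
    let count' := if cell = "_" then count + 1 else count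
    if count' = length then some (col - length + 1)
    else pvAInner row length (if cell = "_" then count' else 0) rest

def pvAOuter (grid : List (List String)) (length : Int) : List Int → Option (Int × Int)
  | [] => none
  | r :: rest =>
    match pvAInner ((PySem.List.pyGet? grid r).getD []) length 0 (PySem.List.pyRange 0 grid.length 1) with
    | some c => some (r, c)
    | none => pvAOuter grid length rest

def insert_word_h_pos (grid : List (List String)) (length : Int) : Option (Int × Int) :=
  pvAOuter grid length (PySem.List.pyRange 0 grid.length 1)

-- ===== PORT B =====
-- mask = ''.join('_' if grid[row][c] == '_' else '#' for c in range(n)), as a List Char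
def pvBMask (row : List String) (cols : List Int) : List Char :=
  cols.map (fun c => if (PySem.List.pyGet? row c).getD "" = "_" then '_' else '#')

def pvBRows (grid : List (List String)) (needle : List Char) : List Int → Option (Int × Int)
  | [] => none
  | r :: rest =>
    let mask := pvBMask ((PySem.List.pyGet? grid r).getD []) (PySem.List.pyRange 0 grid.length 1)
    let i := PySem.Chars.find mask needle
    if i ≠ -1 then some (r, i) else pvBRows grid needle rest

def insert_word_h_pos_alt (grid : List (List String)) (length : Int) : Option (Int × Int) :=
  pvBRows grid (List.replicate length.toNat '_') (PySem.List.pyRange 0 grid.length 1)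

-- ===== PRECONDITION & SPEC =====
-- Pre_ excludes (a) rows shorter than len(grid), where Python A raises IndexError, and
-- (b) nonpositive length, an unspecified corner ("find a run of at most zero underscores")
-- that no caller requests and where A's values ((row, 1) or None) and B's find-based
-- (row, 0) are equally defensible choices.
def Pre_insert_word_h_pos (grid : List (List String)) (length : Int) : Prop :=
  (∀ row ∈ grid, grid.length ≤ row.length) ∧ 1 ≤ length
instance (grid : List (List String)) (length : Int) : Decidable (Pre_insert_word_h_pos grid length) := by unfold Pre_insert_word_h_pos; infer_instance

def pvWitness_insert_word_h_pos : List (List String) × Int := ([["#", "_"], ["_", "_"]], 2)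

def Spec_insert_word_h_pos (grid : List (List String)) (length : Int) (out : Option (Int × Int)) : Prop := out = insert_word_h_pos_alt grid length
instance (grid : List (List String)) (length : Int) (out : Option (Int × Int)) : Decidable (Spec_insert_word_h_pos grid length out) := by unfold Spec_insert_word_h_pos; infer_instance

-- ===== CLAIM (what is proved, stated in full; the proofs are below) =====
def Claim_equal_insert_word_h_pos : Prop := ∀ (grid : List (List String)) (length : Int), Dom_insert_word_h_pos grid length → Pre_insert_word_h_pos grid length → Spec_insert_word_h_pos grid length (insert_word_h_pos grid length)

-- ===== LEMMAS AND PROOFS =====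

-- the consecutive integer columns a, a+1, …, a+m-1
def pvCols (a : Int) (m : Nat) : List Int := (List.range m).map (fun (k : Nat) => a + (k : Int))

-- A's count machine over the mask characters, carrying the current column as idx
def pvMachine (length : Int) : Int → Int → List Char → Option Int
  | _, _, [] => none
  | idx, count, ch :: cs =>
    let c := if ch = '_' then count + 1 else count
    if c = length then some (idx - length + 1)
    else pvMachine length (idx + 1) (if ch = '_' then c else 0) cs

theorem pvCols_succ (a : Int) (m : Nat) : pvCols a (m + 1) = a :: pvCols (a + 1) m := by
  simp only [pvCols, List.range_succ_eq_map, List.map_cons, List.map_map, Nat.cast_zero, add_zero]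
  congr 1
  apply List.map_congr_left
  intro k _
  simp [Function.comp]
  push_cast
  ring

theorem pvPyRange_eq_cols (a b : Int) : PySem.List.pyRange a b 1 = pvCols a (b - a).toNat := by
  rw [PySem.List.pyRange_one]; rfl

theorem pvRepl (n : Nat) (a : Char) (t : List Char) :
    List.replicate n a ++ a :: t = List.replicate (n+1) a ++ t := by
  rw [List.replicate_succ', List.append_assoc]; rfl

theorem pvFind_replicate_short (k l : Nat) (h : k < l) :
    PySem.Chars.find (List.replicate k '_') (List.replicate l '_') = -1 := by
  rw [PySem.Chars.find_eq_neg_one_iff]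
  intro hinf
  have := hinf.length_le
  simp at this; omega

-- find s sub = j when sub occurs at j and nowhere earlier
theorem pvFind_eq_of (s sub : List Char) (j : Nat)
    (hpre : sub <+: s.drop j) (hmin : ∀ i < j, ¬ sub <+: s.drop i) :
    PySem.Chars.find s sub = (j : Int) := by
  have hinf : sub <:+: s := hpre.isInfix.trans (List.drop_suffix j s).isInfix
  have h0 : 0 ≤ PySem.Chars.find s sub := (PySem.Chars.find_nonneg_iff s sub).mpr hinf
  obtain ⟨hp, hm⟩ := PySem.Chars.find_spec (s := s) (sub := sub) h0
  rcases Nat.lt_trichotomy (PySem.Chars.find s sub).toNat j with h | h | h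
  · exact absurd hp (hmin _ h)
  · omega
  · exact absurd hpre (hm j h)

-- no run of l underscores can start at or before a non-underscore preceded by k < l underscores
theorem pvNoEarly (k l : Nat) (ch : Char) (cs : List Char) (hch : ch ≠ '_') (hkl : k < l) :
    ∀ j ≤ k, ¬ (List.replicate l '_') <+: (List.replicate k '_' ++ ch :: cs).drop j := by
  intro j hj hpre
  have hdrop : (List.replicate k '_' ++ ch :: cs).drop j = List.replicate (k-j) '_' ++ ch :: cs := by
    rw [List.drop_append_of_le_length (by simpa using hj), List.drop_replicate]
  rw [hdrop] at hpre
  have hi : k - j < l := by omega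
  have heq := hpre.getElem (i := k - j) (by simpa using hi)
  rw [List.getElem_replicate, List.getElem_append_right (by simp)] at heq
  simp at heq
  exact hch heq.symm

-- a non-underscore after k < l pending underscores pushes the first occurrence past it
theorem pvShift (k l : Nat) (ch : Char) (cs : List Char) (hch : ch ≠ '_') (hkl : k < l) :
    PySem.Chars.find (List.replicate k '_' ++ ch :: cs) (List.replicate l '_') =
      if PySem.Chars.find cs (List.replicate l '_') = -1 then -1
      else PySem.Chars.find cs (List.replicate l '_') + (k + 1) := by
  have hlate : ∀ d, (List.replicate k '_' ++ ch :: cs).drop (k+1+d) = cs.drop d := by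
    intro d
    have h1 : List.replicate k '_' ++ ch :: cs = (List.replicate k '_' ++ [ch]) ++ cs := by simp
    rw [h1, List.drop_append, show (List.replicate k '_' ++ [ch]).length = k + 1 by simp]
    rw [List.drop_eq_nil_of_le (by simp), show k+1+d-(k+1) = d by omega, List.nil_append]
  by_cases hc : PySem.Chars.find cs (List.replicate l '_') = -1
  · rw [if_pos hc, PySem.Chars.find_eq_neg_one_iff]
    intro hinf
    obtain ⟨j, hj⟩ := (PySem.Chars.exists_prefix_drop_iff_isIn _ _).mpr
      ((PySem.Chars.isIn_iff_infix _ _).mpr hinf)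
    by_cases hjk : j ≤ k
    · exact pvNoEarly k l ch cs hch hkl j hjk hj
    · rw [show j = k+1+(j-k-1) by omega, hlate] at hj
      exact (PySem.Chars.find_eq_neg_one_iff _ _).mp hc
        (hj.isInfix.trans (List.drop_suffix _ _).isInfix)
  · rw [if_neg hc]
    have h0 : 0 ≤ PySem.Chars.find cs (List.replicate l '_') := by
      have := PySem.Chars.neg_one_le_find (s := cs) (sub := List.replicate l '_')
      omega
    obtain ⟨hp, hmin⟩ := PySem.Chars.find_spec (s := cs) (sub := List.replicate l '_') h0
    have heq : PySem.Chars.find (List.replicate k '_' ++ ch :: cs) (List.replicate l '_')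
        = ((k + 1 + (PySem.Chars.find cs (List.replicate l '_')).toNat : Nat) : Int) := by
      apply pvFind_eq_of
      · rw [hlate]; exact hp
      · intro i hi hip
        by_cases hik : i ≤ k
        · exact pvNoEarly k l ch cs hch hkl i hik hip
        · rw [show i = k+1+(i-k-1) by omega, hlate] at hip
          exact hmin (i-k-1) (by omega) hip
    rw [heq]
    have := Int.toNat_of_nonneg h0
    push_cast
    omega

-- bridge: A's inner loop over consecutive columns is the machine over B's mask
theorem pvAInner_eq_machine (row : List String) (L : Int) :
    ∀ (m : Nat) (a cnt : Int),
      pvAInner row L cnt (pvCols a m) = pvMachine L a cnt (pvBMask row (pvCols a m)) := by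
  intro m
  induction m with
  | zero => intro a cnt; simp [pvCols, pvAInner, pvBMask, pvMachine]
  | succ n ih =>
    intro a cnt
    rw [pvCols_succ]
    by_cases hc : (PySem.List.pyGet? row a).getD "" = "_"
    · simp only [pvAInner, pvBMask, List.map_cons, pvMachine, hc, if_true]
      by_cases he : cnt + 1 = L
      · simp [he]
      · simp only [he, if_false]
        exact ih (a+1) (cnt+1)
    · simp only [pvAInner, pvBMask, List.map_cons, pvMachine, hc, if_false]
      have h2 : ¬ ('#' = '_') := by decide
      simp only [h2, if_false]
      by_cases he : cnt = L
      · simp [he]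
      · simp only [he, if_false]
        exact ih (a+1) 0

-- the invariant of A's machine: count = number of '_' pending before the current suffix
theorem pvMachine_eq_find (L : Int) (hL : 1 ≤ L) :
    ∀ (ms : List Char) (idx cnt : Int), 0 ≤ cnt → cnt < L →
      pvMachine L idx cnt ms =
        (if PySem.Chars.find (List.replicate cnt.toNat '_' ++ ms) (List.replicate L.toNat '_') = -1
         then none
         else some (PySem.Chars.find (List.replicate cnt.toNat '_' ++ ms) (List.replicate L.toNat '_') + idx - cnt)) := by
  intro ms
  induction ms with
  | nil =>
    intro idx cnt h0 hlt
    rw [List.append_nil]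
    rw [pvFind_replicate_short cnt.toNat L.toNat (by omega)]
    simp [pvMachine]
  | cons ch cs ih =>
    intro idx cnt h0 hlt
    by_cases hch : ch = '_'
    · subst hch
      by_cases he : cnt + 1 = L
      · have hrep : List.replicate cnt.toNat '_' ++ '_' :: cs = List.replicate L.toNat '_' ++ cs := by
          rw [pvRepl, show cnt.toNat + 1 = L.toNat by omega]
        rw [hrep]
        have hf0 : PySem.Chars.find (List.replicate L.toNat '_' ++ cs) (List.replicate L.toNat '_') = (0:Int) := by
          have := pvFind_eq_of (List.replicate L.toNat '_' ++ cs) (List.replicate L.toNat '_') 0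
            (by simpa using List.prefix_append _ _) (by intro i hi; omega)
          simpa using this
        rw [hf0]
        simp only [pvMachine, he]
        norm_num
        omega
      · have hlt' : cnt + 1 < L := by omega
        have hrep : List.replicate cnt.toNat '_' ++ '_' :: cs = List.replicate (cnt+1).toNat '_' ++ cs := by
          rw [pvRepl, show cnt.toNat + 1 = (cnt+1).toNat by omega]
        rw [hrep]
        simp only [pvMachine, if_true, he, if_false]
        rw [ih (idx+1) (cnt+1) (by omega) hlt']
        by_cases hf : PySem.Chars.find (List.replicate (cnt+1).toNat '_' ++ cs) (List.replicate L.toNat '_') = -1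
        · simp [hf]
        · simp only [hf, if_false, Option.some.injEq]
          omega
    · have hne : cnt ≠ L := by omega
      simp only [pvMachine, hch, if_false, hne]
      rw [ih (idx+1) 0 (by omega) (by omega)]
      rw [pvShift cnt.toNat L.toNat ch cs hch (by omega)]
      simp only [Int.toNat_zero, List.replicate_zero, List.nil_append]
      by_cases hf : PySem.Chars.find cs (List.replicate L.toNat '_') = -1
      · simp [hf]
      · have hge := PySem.Chars.neg_one_le_find (s := cs) (sub := List.replicate L.toNat '_')
        have ht := Int.toNat_of_nonneg h0
        simp only [if_neg hf]
        rw [if_neg (by omega : ¬ PySem.Chars.find cs (List.replicate L.toNat '_') + ((cnt.toNat : Int) + 1) = -1)]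
        simp only [Option.some.injEq]
        omega

-- both outer loops walk the same row list; per row A's inner loop equals B's find
theorem pvOuter_eq (grid : List (List String)) (L : Int) (hL : 1 ≤ L) :
    ∀ rows : List Int, pvAOuter grid L rows = pvBRows grid (List.replicate L.toNat '_') rows := by
  intro rows
  induction rows with
  | nil => simp [pvAOuter, pvBRows]
  | cons r rest ih =>
    have hrow : pvAInner ((PySem.List.pyGet? grid r).getD []) L 0 (PySem.List.pyRange 0 grid.length 1)
        = (if PySem.Chars.find (pvBMask ((PySem.List.pyGet? grid r).getD []) (PySem.List.pyRange 0 grid.length 1)) (List.replicate L.toNat '_') = -1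
           then none
           else some (PySem.Chars.find (pvBMask ((PySem.List.pyGet? grid r).getD []) (PySem.List.pyRange 0 grid.length 1)) (List.replicate L.toNat '_'))) := by
      rw [pvPyRange_eq_cols, pvAInner_eq_machine, pvMachine_eq_find L hL _ 0 0 le_rfl (by omega)]
      simp
    simp only [pvAOuter, pvBRows, hrow]
    by_cases hf : PySem.Chars.find (pvBMask ((PySem.List.pyGet? grid r).getD []) (PySem.List.pyRange 0 grid.length 1)) (List.replicate L.toNat '_') = -1
    · simp [hf, ih]
    · simp [hf]

-- ===== VERDICT (by name: the statement is the Claim_ definition above) =====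
theorem insert_word_h_pos_spec : Claim_equal_insert_word_h_pos := by
  intro grid length _ hpre
  unfold Spec_insert_word_h_pos insert_word_h_pos insert_word_h_pos_alt
  exact pvOuter_eq grid length hpre.2 _
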